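-- pv_equiv track=rewrite | github.com/anupriya2104/Campus-Vibe | fetch_emails.py | get_primary_link
-- ===== SOURCE A (Python) =====
-- def get_primary_link(links):
--     if not links:
--         return None
--
--     priority_order = [
--         'registration',
--         'register',
--         'signup',
--         'rsvp',
--         'form',
--         'link'
--     ]
--
--     lower_links = {k.lower(): v for k, v in links.items()}
--
--     for keyword in priority_order:
--         for link_text, url in lower_links.items():
--             if keyword in link_text:
--                 return url
--
--     return next(iter(links.values())) if links else None
-- ===== SOURCE B (Python) =====
-- _PRIORITY = ['registration', 'register', 'signup', 'rsvp', 'form', 'link']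
--
-- def get_primary_link(links):
--     if not links:
--         return None
--     best_rank = len(_PRIORITY)
--     best_url = None
--     for text, url in links.items():
--         t = text.lower()
--         r = next((i for i, kw in enumerate(_PRIORITY) if kw in t), len(_PRIORITY))
--         if r < best_rank:
--             best_rank, best_url = r, url
--     if best_url is not None:
--         return best_url
--     return next(iter(links.values()))
-- ===== Notes on version B (the rewrite author's own statement) =====
-- stated objective: alternative
-- what changed: Replaces the keyword-outer/link-inner nested scan with a single pass over the links that computes each link's priority rank (first matching keyword index) and keeps the first link with the strictly smallest rank.
-- outside the precondition, e.g. on get_primary_link({'LINK': 'u1', 'link': 'u2'}): A returns 'u2', B returns 'u1'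
import Mathlib
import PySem

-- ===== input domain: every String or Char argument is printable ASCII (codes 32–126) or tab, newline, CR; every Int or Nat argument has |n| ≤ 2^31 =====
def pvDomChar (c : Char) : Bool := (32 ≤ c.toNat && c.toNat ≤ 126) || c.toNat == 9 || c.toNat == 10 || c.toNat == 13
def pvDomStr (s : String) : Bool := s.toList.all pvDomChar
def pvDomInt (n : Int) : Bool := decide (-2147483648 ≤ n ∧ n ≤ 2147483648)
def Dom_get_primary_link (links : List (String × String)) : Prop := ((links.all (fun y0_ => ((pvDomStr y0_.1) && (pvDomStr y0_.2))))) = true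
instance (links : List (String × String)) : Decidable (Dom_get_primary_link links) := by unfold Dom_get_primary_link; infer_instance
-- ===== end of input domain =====

-- B replaces A's keyword-outer/link-inner nested scan by a single pass over the links
-- keeping the first link of strictly smallest priority rank (objective: alternative).


-- ===== PORT A =====
def pvPriorityA : List String := ["registration", "register", "signup", "rsvp", "form", "link"]

-- inner loop: 'for link_text, url in lower_links.items(): if keyword in link_text: return url'
def pvInnerA (kw : String) : List (String × String) → Option String
  | [] => none
  | (t, u) :: rest => if PySem.Str.isIn kw t then some u else pvInnerA kw rest

-- outer loop: 'for keyword in priority_order: …'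
def pvOuterA (kws : List String) (items : List (String × String)) : Option String :=
  match kws with
  | [] => none
  | kw :: rest =>
    match pvInnerA kw items with
    | some u => some u
    | none => pvOuterA rest items

def get_primary_link (links : List (String × String)) : Option String :=
  if links.isEmpty then none
  else
    -- lower_links = {k.lower(): v for k, v in links.items()}
    let lower_links : PySem.Dict String String :=
      links.foldl (fun d kv => d.insert (PySem.Str.lower kv.1) kv.2) PySem.Dict.empty
    match pvOuterA pvPriorityA lower_links.items with
    | some u => some u
    | none => if links.isEmpty then none else (links.map (·.2)).head?

-- ===== PORT B =====
def pvPriorityB : List String := ["registration", "register", "signup", "rsvp", "form", "link"]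

-- r = next((i for i, kw in enumerate(_PRIORITY) if kw in t), len(_PRIORITY))
def pvRankB (t : String) : Nat := pvPriorityB.findIdx (fun kw => PySem.Str.isIn kw t)

def get_primary_link_alt (links : List (String × String)) : Option String :=
  if links.isEmpty then none
  else
    let best : Nat × Option String :=
      links.foldl (fun b kv =>
        let r := pvRankB (PySem.Str.lower kv.1)
        if r < b.1 then (r, some kv.2) else b) (pvPriorityB.length, none)
    match best.2 with
    | some u => some u
    | none => (links.map (·.2)).head?

-- ===== PRECONDITION & SPEC =====
-- Pre_ excludes link lists whose key texts collide after lower-casing: there A's dict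
-- comprehension keeps the LAST colliding pair (an accident of dict re-insertion), while B
-- keeps the first matching link; both choices are defensible on such duplicate-key input.
def Pre_get_primary_link (links : List (String × String)) : Prop :=
  (links.map (fun kv => PySem.Str.lower kv.1)).Nodup
instance (links : List (String × String)) : Decidable (Pre_get_primary_link links) := by
  unfold Pre_get_primary_link; infer_instance

def pvWitness_get_primary_link : (List (String × String)) :=
  [("Registration Form", "http://r.example"), ("Home", "http://h.example")]

def Spec_get_primary_link (links : List (String × String)) (out : Option String) : Prop := out = get_primary_link_alt links
instance (links : List (String × String)) (out : Option String) : Decidable (Spec_get_primary_link links out) := by unfold Spec_get_primary_link; infer_instance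

-- ===== CLAIM (what is proved, stated in full; the proofs are below) =====
def Claim_equal_get_primary_link : Prop := ∀ (links : List (String × String)), Dom_get_primary_link links → Pre_get_primary_link links → Spec_get_primary_link links (get_primary_link links)

-- ===== LEMMAS AND PROOFS =====

-- B's one-pass loop, abstracted over the rank function (proof helper only)
def pvFoldG (r : String → Nat) (b : Nat × Option String) : List (String × String) → Nat × Option String
  | [] => b
  | kv :: rest => pvFoldG r (if r kv.1 < b.1 then (r kv.1, some kv.2) else b) rest

theorem pvFoldG_eq_foldl (r : String → Nat) (b : Nat × Option String) (M : List (String × String)) :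
    M.foldl (fun b kv => if r kv.1 < b.1 then (r kv.1, some kv.2) else b) b = pvFoldG r b M := by
  induction M generalizing b with
  | nil => rfl
  | cons kv rest ih => simp [pvFoldG, List.foldl_cons, ih]

theorem pvFoldG_stay (r : String → Nat) (b : Nat × Option String) (M : List (String × String))
    (h : ∀ kv ∈ M, ¬ r kv.1 < b.1) : pvFoldG r b M = b := by
  induction M with
  | nil => rfl
  | cons kv rest ih =>
    have hk : ¬ r kv.1 < b.1 := h kv (by simp)
    simp only [pvFoldG, if_neg hk]
    exact ih (fun kv' hm => h kv' (by simp [hm]))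

theorem pvFoldG_congr (r r' : String → Nat) (b : Nat × Option String) (M : List (String × String))
    (h : ∀ kv ∈ M, r kv.1 = r' kv.1) : pvFoldG r b M = pvFoldG r' b M := by
  induction M generalizing b with
  | nil => rfl
  | cons kv rest ih =>
    have hk : r kv.1 = r' kv.1 := h kv (by simp)
    simp only [pvFoldG, hk]
    exact ih _ (fun kv' hm => h kv' (by simp [hm]))

theorem pvFoldG_first_min (r : String → Nat) (i : Nat) (M : List (String × String))
    (b : Nat × Option String) (kv0 : String × String)
    (hge : ∀ kv ∈ M, i ≤ r kv.1) (hlt : i < b.1)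
    (hfind : M.find? (fun kv => decide (r kv.1 = i)) = some kv0) :
    pvFoldG r b M = (i, some kv0.2) := by
  induction M generalizing b with
  | nil => simp at hfind
  | cons kv rest ih =>
    by_cases hk : r kv.1 = i
    · have hkv0 : kv = kv0 := by
        have := hfind
        rw [List.find?_cons_of_pos (by simp [hk])] at this
        exact Option.some.inj this
      subst hkv0
      simp only [pvFoldG, hk, if_pos hlt]
      exact pvFoldG_stay r (i, some kv.2) rest
        (fun kv' hm => by have := hge kv' (by simp [hm]); omega)
    · have hfind' : rest.find? (fun kv => decide (r kv.1 = i)) = some kv0 := by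
        rwa [List.find?_cons_of_neg (by simp [hk])] at hfind
      have hgt : i < r kv.1 := lt_of_le_of_ne (hge kv (by simp)) (fun h => hk h.symm)
      have hge' : ∀ kv' ∈ rest, i ≤ r kv'.1 := fun kv' hm => hge kv' (by simp [hm])
      simp only [pvFoldG]
      by_cases hb : r kv.1 < b.1
      · rw [if_pos hb]; exact ih _ hge' hgt hfind'
      · rw [if_neg hb]; exact ih _ hge' hlt hfind'

theorem pvFindCongrMem (M : List (String × String)) (p q : String × String → Bool)
    (h : ∀ kv ∈ M, p kv = q kv) : M.find? p = M.find? q := by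
  induction M with
  | nil => rfl
  | cons kv rest ih =>
    have hk : p kv = q kv := h kv (by simp)
    by_cases hp : p kv = true
    · rw [List.find?_cons_of_pos hp, List.find?_cons_of_pos (hk ▸ hp)]
    · have hp' : p kv = false := Bool.eq_false_iff.mpr hp
      rw [List.find?_cons_of_neg (by simp [hp']), List.find?_cons_of_neg (by simp [hk ▸ hp'])]
      exact ih (fun kv' hm => h kv' (by simp [hm]))

theorem pvInnerA_eq_find (kw : String) (M : List (String × String)) :
    pvInnerA kw M = (M.find? (fun kv => PySem.Str.isIn kw kv.1)).map (·.2) := by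
  induction M with
  | nil => rfl
  | cons kv rest ih =>
    obtain ⟨t, u⟩ := kv
    by_cases h : PySem.Str.isIn kw t
    · rw [List.find?_cons_of_pos (p := fun kv => PySem.Str.isIn kw kv.1) (a := (t, u)) (l := rest) h]
      simp only [pvInnerA, if_pos h, Option.map_some]
    · rw [List.find?_cons_of_neg (p := fun kv => PySem.Str.isIn kw kv.1) (a := (t, u)) (l := rest) h]
      simp only [pvInnerA, if_neg h]
      exact ih

-- main lemma: the one-pass strict-min fold computes exactly what A's nested scan returns
theorem pvMain (kws : List String) (base : Nat) (M : List (String × String))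
    (h : base + kws.length = 6) :
    (pvFoldG (fun t => base + kws.findIdx (fun kw => PySem.Str.isIn kw t)) (6, none) M).2
      = pvOuterA kws M := by
  induction kws generalizing base with
  | nil =>
    simp only [List.length_nil, Nat.add_zero] at h
    subst h
    rw [pvFoldG_stay _ _ _ (fun kv _ => by simp [List.findIdx])]
    rfl
  | cons kw rest ih =>
    rcases hfind : M.find? (fun kv => PySem.Str.isIn kw kv.1) with _ | kv0
    · -- no link contains kw: rank shifts to base+1 over rest
      have hnone : ∀ kv ∈ M, PySem.Str.isIn kw kv.1 = false := by
        intro kv hm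
        exact Bool.eq_false_iff.mpr (fun hc => (List.find?_eq_none.mp hfind kv hm) hc)
      rw [pvFoldG_congr _ (fun t => (base + 1) + rest.findIdx (fun kw => PySem.Str.isIn kw t)) _ _
        (fun kv hm => by
          simp only [List.findIdx_cons, hnone kv hm, cond_false]
          omega)]
      have h' : (base + 1) + rest.length = 6 := by
        simp only [List.length_cons] at h; omega
      rw [ih (base + 1) h']
      simp only [pvOuterA, pvInnerA_eq_find, hfind, Option.map_none]
    · -- first link containing kw wins, with rank = base
      have hge : ∀ kv ∈ M, base ≤ base + (kw :: rest).findIdx (fun kw => PySem.Str.isIn kw kv.1) :=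
        fun kv _ => Nat.le_add_right _ _
      have hlt : base < 6 := by simp only [List.length_cons] at h; omega
      have hfind' : M.find? (fun kv =>
          decide (base + (kw :: rest).findIdx (fun kw => PySem.Str.isIn kw kv.1) = base)) = some kv0 := by
        rw [← hfind]
        apply pvFindCongrMem
        intro kv _
        by_cases hc : PySem.Str.isIn kw kv.1
        · simp only [hc, List.findIdx_cons, cond_true]
          simp
        · have hc' : PySem.Str.isIn kw kv.1 = false := Bool.eq_false_iff.mpr hc
          simp only [hc', List.findIdx_cons, cond_false]
          simp only [decide_eq_false_iff_not]
          omega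
      rw [pvFoldG_first_min _ base M _ kv0 hge hlt hfind']
      simp only [pvOuterA, pvInnerA_eq_find, hfind, Option.map_some]

-- ===== VERDICT (by name: the statement is the Claim_ definition above) =====
theorem get_primary_link_spec : Claim_equal_get_primary_link := by
  intro links _ hpre
  unfold Spec_get_primary_link get_primary_link get_primary_link_alt
  by_cases he : links.isEmpty
  · simp [he]
  · simp only [he, if_false, Bool.false_eq_true]
    -- 1. under Pre_, the lowered dict's items are just the lowered list
    have hitems :
        (links.foldl (fun d kv => d.insert (PySem.Str.lower kv.1) kv.2)
            (PySem.Dict.empty : PySem.Dict String String)).items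
          = links.map (fun kv => (PySem.Str.lower kv.1, kv.2)) := by
      have := PySem.Dict.items_foldl_insert_fresh (d := (PySem.Dict.empty : PySem.Dict String String))
        (l := links) (k := fun kv => PySem.Str.lower kv.1) (v := fun kv => kv.2)
        (fun a _ => by simp [pysem]) (by simpa [Function.comp] using hpre)
      simpa [pysem] using this
    rw [hitems]
    -- 2. B's fold over links = the abstract fold over the lowered list
    have hfold :
        links.foldl (fun b kv =>
            let r := pvRankB (PySem.Str.lower kv.1)
            if r < b.1 then (r, some kv.2) else b) (pvPriorityB.length, none)
          = pvFoldG (fun t => 0 + pvPriorityA.findIdx (fun kw => PySem.Str.isIn kw t)) (6, none)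
              (links.map (fun kv => (PySem.Str.lower kv.1, kv.2))) := by
      rw [← pvFoldG_eq_foldl, List.foldl_map]
      simp [pvRankB, pvPriorityB, pvPriorityA]
    rw [hfold, pvMain pvPriorityA 0 _ (by simp [pvPriorityA])]
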